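-- pv_equiv track=rewrite | github.com/verum-lang/verum | vcs/scripts/fix_ffi_syntax.py | fix_ffi_function_syntax
-- ===== SOURCE A (Python) =====
-- def fix_ffi_function_syntax(content: str) -> str:
--     """
--     Fix FFI function declarations to have semicolons.
--
--     Pattern: @extern("C")\n fn name(...) -> Type\n    ensures/requires/memory_effects
--     Should be: @extern("C")\n fn name(...) -> Type;\n ensures...;
--     """
--     lines = content.split('\n')
--     result = []
--     in_ffi = False
--     brace_depth = 0
--
--     i = 0
--     while i < len(lines):
--         line = lines[i]
--         stripped = line.strip()
--
--         # Track if we're inside an ffi block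
--         if stripped.startswith('ffi ') and '{' in line:
--             in_ffi = True
--             brace_depth = 1
--             result.append(line)
--             i += 1
--             continue
--
--         if in_ffi:
--             brace_depth += line.count('{') - line.count('}')
--             if brace_depth <= 0:
--                 in_ffi = False
--
--         # Inside FFI block, look for function declarations without semicolons
--         if in_ffi and stripped.startswith('fn ') and '->' in stripped:
--             # Check if line ends with type (no semicolon)
--             if not stripped.endswith(';') and not stripped.endswith('{'):
--                 # Look ahead to see if next line is a contract clause
--                 if i + 1 < len(lines):
--                     next_stripped = lines[i + 1].strip()
--                     if (next_stripped.startswith('ensures') or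
--                         next_stripped.startswith('requires') or
--                         next_stripped.startswith('memory_effects') or
--                         next_stripped.startswith('thread_safe') or
--                         next_stripped.startswith('errors_via') or
--                         next_stripped.startswith('@ownership')):
--                         # Add semicolon to function line
--                         line = line.rstrip() + ';'
--
--         # Also handle fn declarations that span multiple lines
--         if in_ffi and stripped.startswith('fn ') and not stripped.endswith(';') and not stripped.endswith('{') and not stripped.endswith(','):
--             # Look for closing paren followed by return type
--             if ')' in stripped and '->' not in stripped:
--                 # Multi-line function, need to find the end
--                 pass  # Handle later if needed
--
--         result.append(line)
--         i += 1
--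
--     return '\n'.join(result)
-- ===== SOURCE B (Python) =====
-- def fix_ffi_function_syntax(content: str) -> str:
--     """Staged decomposition: pass 1 precomputes the per-line FFI guard state
--     into a flags list; pass 2 is a stateless zip over (line, next line, flag)
--     that decides the semicolon locally. No scanning state in the rewrite pass."""
--     CONTRACTS = ('ensures', 'requires', 'memory_effects',
--                  'thread_safe', 'errors_via', '@ownership')
--     lines = content.split('\n')
--
--     # Pass 1: guard state at each line (A's in_ffi after the brace update;
--     # an 'ffi ... {' opener line itself is never eligible).
--     flags = []
--     in_ffi = False
--     depth = 0
--     for line in lines: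
--         s = line.strip()
--         if s.startswith('ffi ') and '{' in line:
--             in_ffi, depth = True, 1
--             flags.append(False)
--         else:
--             if in_ffi:
--                 depth += line.count('{') - line.count('}')
--                 in_ffi = depth > 0
--             flags.append(in_ffi)
--
--     # Pass 2: stateless per-line rewrite with explicit look-ahead pairs.
--     def fix(line, nxt, flag):
--         s = line.strip()
--         if (flag and s.startswith('fn ') and '->' in s
--                 and not s.endswith(';') and not s.endswith('{')
--                 and nxt is not None and nxt.strip().startswith(CONTRACTS)):
--             return line.rstrip() + ';'
--         return line
--
--     return '\n'.join(fix(l, n, f)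
--                      for l, n, f in zip(lines, lines[1:] + [None], flags))
-- ===== Notes on version B (the rewrite author's own statement) =====
-- stated objective: alternative
-- what changed: Splits A's single stateful scan into two staged passes: pass 1 precomputes a per-line FFI-guard flags list, pass 2 is a stateless zip over (line, next-line, flag) triples that rewrites each line locally.
import Mathlib
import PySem

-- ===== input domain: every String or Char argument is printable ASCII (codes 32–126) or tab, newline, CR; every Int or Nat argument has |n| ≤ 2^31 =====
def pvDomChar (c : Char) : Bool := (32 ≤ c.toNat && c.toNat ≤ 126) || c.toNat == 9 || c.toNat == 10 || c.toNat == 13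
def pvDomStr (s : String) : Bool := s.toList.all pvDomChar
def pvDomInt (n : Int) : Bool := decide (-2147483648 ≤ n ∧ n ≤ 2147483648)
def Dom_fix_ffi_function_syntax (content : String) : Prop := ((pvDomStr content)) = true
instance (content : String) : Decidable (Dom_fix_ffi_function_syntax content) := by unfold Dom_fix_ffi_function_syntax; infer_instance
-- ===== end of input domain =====

-- B replaces A's single stateful scan with two staged passes: precompute a
-- per-line guard-flag list, then a stateless zip rewrite (objective: alternative).

-- shared helper: the six contract keywords (A writes the disjunction inline,
-- B calls startswith with the tuple — the same six checks)
def pvContract (s : String) : Bool :=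
  PySem.Str.startswith s "ensures" || PySem.Str.startswith s "requires" ||
  PySem.Str.startswith s "memory_effects" || PySem.Str.startswith s "thread_safe" ||
  PySem.Str.startswith s "errors_via" || PySem.Str.startswith s "@ownership"

-- ===== PORT A =====
def pvGoA : List String → Bool → Int → List String
  | [], _, _ => []
  | line :: rest, in_ffi, depth =>
    let stripped := PySem.Str.strip line
    if PySem.Str.startswith stripped "ffi " && PySem.Str.isIn "{" line then
      line :: pvGoA rest true 1
    else
      let p : Bool × Int :=
        if in_ffi then
          let d := depth + (PySem.Str.count line "{" : Int) - (PySem.Str.count line "}" : Int)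
          (decide (0 < d), d)
        else (in_ffi, depth)
      let line' :=
        if p.1 && PySem.Str.startswith stripped "fn " && PySem.Str.isIn "->" stripped
            && !PySem.Str.endswith stripped ";" && !PySem.Str.endswith stripped "{" then
          match rest.head? with
          | some nxt =>
            if pvContract (PySem.Str.strip nxt) then PySem.Str.rstrip line ++ ";" else line
          | none => line
        else line
      line' :: pvGoA rest p.1 p.2

def fix_ffi_function_syntax (content : String) : String :=
  PySem.Str.join "\n" (pvGoA ((PySem.Str.split? content "\n").getD []) false 0)

-- ===== PORT B =====
-- pass 1: the per-line guard-state flags list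
def pvFlags : List String → Bool → Int → List Bool
  | [], _, _ => []
  | line :: rest, in_ffi, depth =>
    let s := PySem.Str.strip line
    if PySem.Str.startswith s "ffi " && PySem.Str.isIn "{" line then
      false :: pvFlags rest true 1
    else
      let p : Bool × Int :=
        if in_ffi then
          let d := depth + (PySem.Str.count line "{" : Int) - (PySem.Str.count line "}" : Int)
          (decide (0 < d), d)
        else (in_ffi, depth)
      p.1 :: pvFlags rest p.1 p.2

-- pass 2: stateless per-line rewrite given the look-ahead line and the flag
def pvFix (line : String) (nxt : Option String) (flag : Bool) : String :=
  let s := PySem.Str.strip line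
  if flag && PySem.Str.startswith s "fn " && PySem.Str.isIn "->" s
      && !PySem.Str.endswith s ";" && !PySem.Str.endswith s "{"
      && (match nxt with | some n => pvContract (PySem.Str.strip n) | none => false) then
    PySem.Str.rstrip line ++ ";"
  else line

def fix_ffi_function_syntax_alt (content : String) : String :=
  let lines := (PySem.Str.split? content "\n").getD []
  let nexts : List (Option String) := (lines.drop 1).map Option.some ++ [Option.none]
  PySem.Str.join "\n"
    (List.zipWith (fun (p : String × Option String) f => pvFix p.1 p.2 f)
      (lines.zip nexts) (pvFlags lines false 0))

-- ===== PRECONDITION & SPEC =====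
def Spec_fix_ffi_function_syntax (content : String) (out : String) : Prop := out = fix_ffi_function_syntax_alt content
instance (content : String) (out : String) : Decidable (Spec_fix_ffi_function_syntax content out) := by unfold Spec_fix_ffi_function_syntax; infer_instance

-- ===== CLAIM (what is proved, stated in full; the proofs are below) =====
def Claim_equal_fix_ffi_function_syntax : Prop := ∀ (content : String), Dom_fix_ffi_function_syntax content → Spec_fix_ffi_function_syntax content (fix_ffi_function_syntax content)

-- ===== LEMMAS AND PROOFS =====

def pvNexts (lines : List String) : List (Option String) :=
  (lines.drop 1).map Option.some ++ [Option.none]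

-- the look-ahead list decomposes one line at a time, head? first
lemma pvNexts_cons (l : String) (rest : List String) :
    pvNexts (l :: rest) = rest.head? :: (pvNexts (l :: rest)).tail := by
  cases rest <;> simp [pvNexts]

lemma pvNexts_tail (l : String) (n : String) (r : List String) :
    (pvNexts (l :: n :: r)).tail = pvNexts (n :: r) := by
  simp [pvNexts]

-- A's scan equals B's staged zip rewrite, for every starting state
lemma pvGoA_eq_zip (lines : List String) : ∀ (f : Bool) (d : Int),
    pvGoA lines f d =
      List.zipWith (fun (p : String × Option String) fl => pvFix p.1 p.2 fl)
        (lines.zip (pvNexts lines)) (pvFlags lines f d) := by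
  induction lines with
  | nil => intro f d; simp [pvGoA, pvFlags]
  | cons line rest ih =>
    intro f d
    rw [pvNexts_cons]
    have htail : (rest.zip ((pvNexts (line :: rest)).tail)) = rest.zip (pvNexts rest) := by
      cases rest with
      | nil => simp
      | cons n r => rw [pvNexts_tail]
    rw [pvGoA, pvFlags]
    by_cases hffi : (PySem.Str.startswith (PySem.Str.strip line) "ffi " &&
        PySem.Str.isIn "{" line) = true
    · rw [if_pos hffi, if_pos hffi]
      simp only [List.zip_cons_cons, List.zipWith_cons_cons, htail]
      refine congrArg₂ _ ?_ (ih true 1)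
      simp [pvFix]
    · rw [if_neg hffi, if_neg hffi]
      simp only [List.zip_cons_cons, List.zipWith_cons_cons, htail]
      refine congrArg₂ _ ?_ (ih _ _)
      -- the per-line fixups agree: both apply the same guard and contract test
      cases rest with
      | nil => simp [pvFix]
      | cons nxt r =>
        simp only [List.head?_cons, pvFix]
        by_cases hc : pvContract (PySem.Str.strip nxt) = true <;>
          by_cases hg : ((if f = true then
              (decide (0 < d + (PySem.Str.count line "{" : Int) - (PySem.Str.count line "}" : Int)),
                d + (PySem.Str.count line "{" : Int) - (PySem.Str.count line "}" : Int))
            else (f, d)).1 && PySem.Str.startswith (PySem.Str.strip line) "fn " &&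
            PySem.Str.isIn "->" (PySem.Str.strip line) &&
            !PySem.Str.endswith (PySem.Str.strip line) ";" &&
            !PySem.Str.endswith (PySem.Str.strip line) "{") = true <;>
          simp_all

-- ===== VERDICT (by name: the statement is the Claim_ definition above) =====
theorem fix_ffi_function_syntax_spec : Claim_equal_fix_ffi_function_syntax := by
  intro content _
  unfold Spec_fix_ffi_function_syntax fix_ffi_function_syntax fix_ffi_function_syntax_alt
  rw [pvGoA_eq_zip]
  rfl
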